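-- pv_equiv track=rewrite | github.com/GR3ATB0B/chord-engine | src/voice_leading.py | _place_in_octave
-- ===== SOURCE A (Python) =====
-- def _place_in_octave(pitch_classes, octave):
--     """Place pitch classes in a given octave. Simple default voicing."""
--     notes = []
--     for pc in pitch_classes:
--         note = octave * 12 + pc
--         # Keep in MIDI range
--         while note < 36:
--             note += 12
--         while note > 84:
--             note -= 12
--         notes.append(note)
--     return sorted(notes)
-- ===== SOURCE B (Python) =====
-- def _clamp_to_midi(note):
--     """Closed-form equivalent of the up-then-down while loops."""
--     if note < 36:
--         return note + 12 * ((36 - note + 11) // 12)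
--     if note > 84:
--         return note - 12 * ((note - 84 + 11) // 12)
--     return note
--
--
-- def _place_in_octave(pitch_classes, octave):
--     """Place pitch classes in a given octave. Simple default voicing."""
--     base = octave * 12
--     return sorted(_clamp_to_midi(base + pc) for pc in pitch_classes)
-- ===== Notes on version B (the rewrite author's own statement) =====
-- stated objective: faster
-- what changed: The two per-note while loops (which take Theta(|note-60|/12) iterations, unbounded in |octave|) are replaced by a closed-form ceiling-division clamp computing each note in O(1).
import Mathlib
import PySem

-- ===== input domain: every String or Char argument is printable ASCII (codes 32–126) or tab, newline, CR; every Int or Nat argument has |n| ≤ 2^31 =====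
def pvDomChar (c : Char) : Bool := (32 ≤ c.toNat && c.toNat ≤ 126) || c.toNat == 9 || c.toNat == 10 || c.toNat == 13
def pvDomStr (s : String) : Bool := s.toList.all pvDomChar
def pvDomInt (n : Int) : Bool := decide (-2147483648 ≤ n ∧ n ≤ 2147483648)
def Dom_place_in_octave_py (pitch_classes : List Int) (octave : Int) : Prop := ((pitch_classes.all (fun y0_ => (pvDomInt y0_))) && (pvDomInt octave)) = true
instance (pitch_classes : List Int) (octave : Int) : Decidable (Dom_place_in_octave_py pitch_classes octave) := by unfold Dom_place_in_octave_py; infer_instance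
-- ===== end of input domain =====

-- B replaces the two per-note clamping while loops with a closed-form ceiling-division clamp (objective: simpler).


-- ===== PORT A =====
-- `while note < 36: note += 12`
def pvUpLoop (note : Int) : Int :=
  if note < 36 then pvUpLoop (note + 12) else note
termination_by (36 - note).toNat
decreasing_by omega

-- `while note > 84: note -= 12`
def pvDownLoop (note : Int) : Int :=
  if note > 84 then pvDownLoop (note - 12) else note
termination_by (note - 84).toNat
decreasing_by omega

def place_in_octave_py (pitch_classes : List Int) (octave : Int) : List Int :=
  let notes := pitch_classes.foldl (fun acc pc => acc ++ [pvDownLoop (pvUpLoop (octave * 12 + pc))]) []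
  PySem.List.sorted notes (fun x => x) false

-- ===== PORT B =====
def pvClamp (note : Int) : Int :=
  if note < 36 then note + 12 * PySem.Int.floordiv (36 - note + 11) 12
  else if note > 84 then note - 12 * PySem.Int.floordiv (note - 84 + 11) 12
  else note

def place_in_octave_py_alt (pitch_classes : List Int) (octave : Int) : List Int :=
  let base := octave * 12
  PySem.List.sorted (pitch_classes.map (fun pc => pvClamp (base + pc))) (fun x => x) false

-- ===== PRECONDITION & SPEC =====
def Spec_place_in_octave_py (pitch_classes : List Int) (octave : Int) (out : List Int) : Prop := out = place_in_octave_py_alt pitch_classes octave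
instance (pitch_classes : List Int) (octave : Int) (out : List Int) : Decidable (Spec_place_in_octave_py pitch_classes octave out) := by unfold Spec_place_in_octave_py; infer_instance

-- ===== CLAIM (what is proved, stated in full; the proofs are below) =====
def Claim_equal_place_in_octave_py : Prop := ∀ (pitch_classes : List Int) (octave : Int), Dom_place_in_octave_py pitch_classes octave → Spec_place_in_octave_py pitch_classes octave (place_in_octave_py pitch_classes octave)

-- ===== LEMMAS AND PROOFS =====

theorem pvUpLoop_eq (n : Int) :
    pvUpLoop n = if n < 36 then n + 12 * PySem.Int.floordiv (36 - n + 11) 12 else n := by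
  fun_induction pvUpLoop n with
  | case1 n h ih =>
      rw [ih]
      rw [PySem.Int.floordiv_eq_ediv_of_pos (a := 36 - (n + 12) + 11) (by norm_num),
          PySem.Int.floordiv_eq_ediv_of_pos (a := 36 - n + 11) (by norm_num)]
      split_ifs <;> omega
  | case2 n h => simp [h]

theorem pvDownLoop_eq (n : Int) :
    pvDownLoop n = if n > 84 then n - 12 * PySem.Int.floordiv (n - 84 + 11) 12 else n := by
  fun_induction pvDownLoop n with
  | case1 n h ih =>
      rw [ih]
      rw [PySem.Int.floordiv_eq_ediv_of_pos (a := n - 12 - 84 + 11) (by norm_num),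
          PySem.Int.floordiv_eq_ediv_of_pos (a := n - 84 + 11) (by norm_num)]
      split_ifs <;> omega
  | case2 n h => simp [h]

theorem clamp_eq_loops (n : Int) : pvDownLoop (pvUpLoop n) = pvClamp n := by
  rw [pvUpLoop_eq, pvClamp]
  by_cases h : n < 36
  · simp only [h, if_pos]
    rw [pvDownLoop_eq]
    rw [PySem.Int.floordiv_eq_ediv_of_pos (a := 36 - n + 11) (by norm_num)]
    have : ¬ (n + 12 * ((36 - n + 11) / 12) > 84) := by omega
    simp [this]
  · simp only [h, if_false]
    rw [pvDownLoop_eq]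

theorem foldl_append_eq_map (f : Int → Int) (xs : List Int) (acc : List Int) :
    xs.foldl (fun acc x => acc ++ [f x]) acc = acc ++ xs.map f := by
  induction xs generalizing acc with
  | nil => simp
  | cons x t ih => simp [List.foldl, ih]

-- ===== VERDICT (by name: the statement is the Claim_ definition above) =====
theorem place_in_octave_py_spec : Claim_equal_place_in_octave_py := by
  intro pitch_classes octave _
  unfold Spec_place_in_octave_py place_in_octave_py place_in_octave_py_alt
  simp only [foldl_append_eq_map, List.nil_append]
  congr 1
  exact List.map_congr_left (fun pc _ => clamp_eq_loops (octave * 12 + pc))
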